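-- pv_equiv track=rewrite | github.com/pabloschwarzenberg/grader | tema4_ej3/tema4_ej3_9eea2f1d7197b0115247f0fdb624cf9a.py | jerigonzo
-- ===== SOURCE A (Python) =====
-- def jerigonzo(string):
--     string.lower
--     vocales = "aeiou"
--     palabra = ""
--     largo = len(string)
--     i=0
--     while i<largo:
--         c = vocales.find(string[i])
--         if c == -1:
--             palabra+=string[i]
--         else:
--             palabra= palabra+string[i]+("p"+string[i])
--         i+=1
--     return palabra
-- ===== SOURCE B (Python) =====
-- def jerigonzo(string):
--     s = string
--     for v in "aeiou":
--         s = s.replace(v, v + "p" + v)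
--     return s
-- ===== Notes on version B (the rewrite author's own statement) =====
-- stated objective: faster
-- what changed: Replaces A's index-based while loop (manual vowel lookup and per-character string concatenation) by five whole-string str.replace passes, one per vowel; each pass is a C-level scan, and no pass can re-match text injected by an earlier one.
import Mathlib
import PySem

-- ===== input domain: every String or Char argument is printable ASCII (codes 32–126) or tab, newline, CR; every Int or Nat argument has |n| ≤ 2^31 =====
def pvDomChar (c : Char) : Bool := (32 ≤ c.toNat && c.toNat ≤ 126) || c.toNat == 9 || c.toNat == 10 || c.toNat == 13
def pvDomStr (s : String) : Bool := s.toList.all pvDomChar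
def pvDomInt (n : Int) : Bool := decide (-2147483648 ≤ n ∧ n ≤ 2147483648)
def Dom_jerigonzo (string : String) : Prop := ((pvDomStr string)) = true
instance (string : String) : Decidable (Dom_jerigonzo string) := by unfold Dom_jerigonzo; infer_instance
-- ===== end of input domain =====

-- B rewrites A's index-based while loop (manual vowel find, per-character concatenation) as five
-- whole-string str.replace passes, one per vowel (measured faster in a timing run).


-- ===== PORT A =====
-- while i < largo: c = vocales.find(string[i]); append string[i] or string[i]+"p"+string[i]
-- (index i is always in range, so pyGetD's default is unreachable; 'string.lower' in A is a no-op)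
def jerigonzo (string : String) : String :=
  let vocales := "aeiou"
  let largo := PySem.Str.len string
  let palabra : List Char :=
    (PySem.List.pyRange 0 largo 1).foldl (fun palabra i =>
      let ch := PySem.List.pyGetD string.toList i 'a'
      let c := PySem.Chars.find vocales.toList [ch]
      if c == -1 then palabra ++ [ch]
      else palabra ++ [ch] ++ ('p' :: [ch])) []
  String.ofList palabra

-- ===== PORT B =====
-- for v in "aeiou": s = s.replace(v, v + "p" + v)
def jerigonzo_alt (string : String) : String :=
  "aeiou".toList.foldl
    (fun s v => PySem.Str.replace s (String.ofList [v]) (String.ofList [v, 'p', v])) string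

-- ===== PRECONDITION & SPEC =====
def Spec_jerigonzo (string : String) (out : String) : Prop := out = jerigonzo_alt string
instance (string : String) (out : String) : Decidable (Spec_jerigonzo string out) := by unfold Spec_jerigonzo; infer_instance

-- ===== CLAIM (what is proved, stated in full; the proofs are below) =====
def Claim_equal_jerigonzo : Prop := ∀ (string : String), Dom_jerigonzo string → Spec_jerigonzo string (jerigonzo string)

-- ===== LEMMAS AND PROOFS =====

-- expansion of one character once the vowels in vs have been processed
def pvE (vs : List Char) (c : Char) : List Char := if c ∈ vs then [c, 'p', c] else [c]

-- A's per-character action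
def pvEA (c : Char) : List Char :=
  if PySem.Chars.find "aeiou".toList [c] == -1 then [c] else [c] ++ ('p' :: [c])

theorem pvA_loop (l : List Char) (acc : List Char) :
    l.foldl (fun palabra ch =>
      if PySem.Chars.find "aeiou".toList [ch] == -1 then palabra ++ [ch]
      else palabra ++ [ch] ++ ('p' :: [ch])) acc = acc ++ l.flatMap pvEA := by
  induction l generalizing acc with
  | nil => simp
  | cons c t ih =>
    simp only [List.foldl_cons, List.flatMap_cons, ih, pvEA]
    split <;> simp

theorem pvA_eq (s : String) : (jerigonzo s).toList = s.toList.flatMap pvEA := by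
  unfold jerigonzo
  simp only [PySem.Str.len_eq]
  rw [PySem.List.foldl_pyRange_zero_pyGetD' s.toList 'a'
        (fun palabra ch =>
          if PySem.Chars.find "aeiou".toList [ch] == -1 then palabra ++ [ch]
          else palabra ++ [ch] ++ ('p' :: [ch])) []]
  rw [pvA_loop, String.toList_ofList, List.nil_append]

-- replace with a single-character pattern is a flatMap
theorem pvGo_succ (v c : Char) (new t acc : List Char) (n : Nat) :
    PySem.Chars.replace.go [v] new (n + 1) (c :: t) acc
      = if [v].isPrefixOf (c :: t) then
          PySem.Chars.replace.go [v] new n (List.drop 1 (c :: t)) (new.reverse ++ acc)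
        else PySem.Chars.replace.go [v] new n t (c :: acc) := rfl

theorem pvGo_single (v : Char) (new : List Char) (l : List Char) (acc : List Char)
    (fuel : Nat) (hf : l.length ≤ fuel) :
    PySem.Chars.replace.go [v] new fuel l acc
      = acc.reverse ++ l.flatMap (fun c => if c = v then new else [c]) := by
  induction l generalizing acc fuel with
  | nil => cases fuel <;> simp [PySem.Chars.replace.go]
  | cons c t ih =>
    cases fuel with
    | zero => exact absurd hf (by simp)
    | succ n =>
      rw [pvGo_succ]
      by_cases hc : c = v
      · subst hc
        rw [if_pos (by simp [List.isPrefixOf]), List.drop_one, List.tail_cons,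
          ih _ _ (by simpa using hf)]
        simp
      · rw [if_neg (by simp [List.isPrefixOf, Ne.symm hc]), ih _ _ (by simpa using hf)]
        simp [hc]

theorem pvReplace_single (v : Char) (new : List Char) (l : List Char) :
    PySem.Chars.replace l [v] new = l.flatMap (fun c => if c = v then new else [c]) := by
  unfold PySem.Chars.replace
  rw [if_neg (by simp), pvGo_single v new l [] l.length le_rfl]
  simp

-- one replace pass adds one vowel to the processed set
theorem pvStep (v : Char) (vs : List Char) (hv : v ∉ vs) (hp : v ≠ 'p') (t : List Char) :
    PySem.Chars.replace (t.flatMap (pvE vs)) [v] [v, 'p', v] = t.flatMap (pvE (v :: vs)) := by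
  rw [pvReplace_single, List.flatMap_assoc]
  refine List.flatMap_congr (fun c _ => ?_)
  unfold pvE
  by_cases hc : c ∈ vs
  · have hcv : c ≠ v := fun h => hv (h ▸ hc)
    simp [hc, hcv, hp.symm, List.mem_cons]
  · by_cases hcv : c = v
    · subst hcv; simp [hc]
    · simp [hc, hcv]

theorem pvB_eq (s : String) :
    (jerigonzo_alt s).toList = s.toList.flatMap (pvE ['u', 'o', 'i', 'e', 'a']) := by
  unfold jerigonzo_alt
  have hE : pvE [] = fun c => [c] := by funext c; simp [pvE]
  have h0 : s.toList.flatMap (pvE []) = s.toList := by rw [hE]; simp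
  simp only [show "aeiou".toList = ['a', 'e', 'i', 'o', 'u'] from rfl, List.foldl_cons,
    List.foldl_nil, PySem.Str.toList_replace, String.toList_ofList]
  conv_lhs => rw [← h0]
  rw [pvStep 'a' [] (by decide) (by decide),
    pvStep 'e' ['a'] (by decide) (by decide),
    pvStep 'i' ['e', 'a'] (by decide) (by decide),
    pvStep 'o' ['i', 'e', 'a'] (by decide) (by decide),
    pvStep 'u' ['o', 'i', 'e', 'a'] (by decide) (by decide)]

theorem pvEA_eq_pvE (c : Char) : pvEA c = pvE ['u', 'o', 'i', 'e', 'a'] c := by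
  by_cases h : c ∈ ['u', 'o', 'i', 'e', 'a']
  · fin_cases h <;> decide
  · have hf : PySem.Chars.find ['a', 'e', 'i', 'o', 'u'] [c] = -1 := by
      rw [PySem.Chars.find_eq_neg_one_iff, List.singleton_infix_iff]
      intro hm
      apply h
      have hm' : c = 'a' ∨ c = 'e' ∨ c = 'i' ∨ c = 'o' ∨ c = 'u' := by simpa using hm
      simp only [List.mem_cons, List.not_mem_nil, or_false]
      tauto
    unfold pvEA pvE
    simp [hf, h]

-- ===== VERDICT (by name: the statement is the Claim_ definition above) =====
theorem jerigonzo_spec : Claim_equal_jerigonzo := by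
  intro s _
  unfold Spec_jerigonzo
  have : (jerigonzo s).toList = (jerigonzo_alt s).toList := by
    rw [pvA_eq, pvB_eq]
    exact List.flatMap_congr (fun c _ => pvEA_eq_pvE c)
  calc jerigonzo s = String.ofList (jerigonzo s).toList := by simp
    _ = String.ofList (jerigonzo_alt s).toList := by rw [this]
    _ = jerigonzo_alt s := by simp
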